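-- pv_equiv track=rewrite | github.com/DasLab/arnie | src/arnie/utils.py | flip_ss
-- ===== SOURCE A (Python) =====
-- def flip_ss(ss):
--     """ Flips a secondary structure
--     Only flips the unpaired bases
--     e.g. (.((....))....( ->
--          ).((....))....)
--     """
--     bp_list = []
--     unmatch_list = []
--     ss = list(ss)
--     for idx, c in enumerate(ss):
--         if c == '(':
--             bp_list.append(idx)
--         elif c == ')':
--             if len(bp_list):
--                 bp_list.pop()
--             else:
--                 unmatch_list.append(idx)
--     unmatch_list += bp_list
--     for idx in unmatch_list:
--         if ss[idx] == '(':
--             ss[idx] = ')'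
--         else:
--             ss[idx] = '('
--     ss = ''.join(ss)
--     return ss
-- ===== SOURCE B (Python) =====
-- def flip_ss(ss):
--     """Flips a secondary structure, flipping only unpaired bases.
--
--     Two oppositely-directed counter passes instead of an index stack:
--     left-to-right finds unmatched ')', right-to-left finds unmatched '('.
--     """
--     cs = list(ss)
--     flips = []
--     # pass 1, left to right: unmatched closing parens
--     opens = 0
--     for idx, c in enumerate(cs):
--         if c == '(':
--             opens += 1
--         elif c == ')':
--             if opens:
--                 opens -= 1
--             else:
--                 flips.append(idx)
--     # pass 2, right to left: unmatched opening parens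
--     closes = 0
--     for idx, c in reversed(list(enumerate(cs))):
--         if c == ')':
--             closes += 1
--         elif c == '(':
--             if closes:
--                 closes -= 1
--             else:
--                 flips.append(idx)
--     for idx in flips:
--         cs[idx] = ')' if cs[idx] == '(' else '('
--     return ''.join(cs)
-- ===== Notes on version B (the rewrite author's own statement) =====
-- stated objective: alternative
-- what changed: Replaces A's single stack-of-indices pass with two oppositely-directed integer-counter passes: left-to-right records unmatched ')' indices, right-to-left records unmatched '(' indices, then each recorded position is flipped.
import Mathlib
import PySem

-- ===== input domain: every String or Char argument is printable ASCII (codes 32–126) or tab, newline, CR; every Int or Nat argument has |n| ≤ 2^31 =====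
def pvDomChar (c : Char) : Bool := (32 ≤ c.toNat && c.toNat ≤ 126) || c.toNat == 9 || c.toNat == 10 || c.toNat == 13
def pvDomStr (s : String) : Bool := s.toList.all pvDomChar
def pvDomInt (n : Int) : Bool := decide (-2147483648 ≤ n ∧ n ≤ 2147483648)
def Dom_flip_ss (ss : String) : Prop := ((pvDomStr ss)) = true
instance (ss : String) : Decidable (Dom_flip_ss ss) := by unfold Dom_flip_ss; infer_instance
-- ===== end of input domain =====

-- B replaces A's index stack by two oppositely-directed counter passes (alternative decomposition, same O(n) cost).

-- ===== PORT A =====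
-- loop body of A's first 'for idx, c in enumerate(ss)' loop (stack of '(' indices, list of unmatched ')' indices)
def pvStepA (st : List Int × List Int) (ic : Int × Char) : List Int × List Int :=
  if ic.2 = '(' then (st.1 ++ [ic.1], st.2)
  else if ic.2 = ')' then
    -- 'if len(bp_list): bp_list.pop()' : pop() on a nonempty list removes its last element = dropLast
    if st.1.length ≠ 0 then (st.1.dropLast, st.2) else (st.1, st.2 ++ [ic.1])
  else st

-- "if ss[idx]=='(': ss[idx]=')' else: ss[idx]='('" — exact via PySem pyGetD/pySetD (idx always in range here)
def pvFlip (cs : List Char) (i : Int) : List Char :=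
  PySem.List.pySetD cs i (if PySem.List.pyGetD cs i ' ' = '(' then ')' else '(')

def flip_ss (ss : String) : String :=
  let cs := ss.toList
  let r := (PySem.List.enumerate cs).foldl pvStepA ([], [])
  let unmatch := r.2 ++ r.1          -- unmatch_list += bp_list
  String.ofList (unmatch.foldl pvFlip cs)

-- ===== PORT B =====
-- pass 1, left to right: open counter, record unmatched ')' indices
def pvStepB1 (st : Nat × List Int) (ic : Int × Char) : Nat × List Int :=
  if ic.2 = '(' then (st.1 + 1, st.2)
  else if ic.2 = ')' then
    if st.1 ≠ 0 then (st.1 - 1, st.2) else (st.1, st.2 ++ [ic.1])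
  else st

-- pass 2, right to left: close counter, record unmatched '(' indices
def pvStepB2 (st : Nat × List Int) (ic : Int × Char) : Nat × List Int :=
  if ic.2 = ')' then (st.1 + 1, st.2)
  else if ic.2 = '(' then
    if st.1 ≠ 0 then (st.1 - 1, st.2) else (st.1, st.2 ++ [ic.1])
  else st

def flip_ss_alt (ss : String) : String :=
  let cs := ss.toList
  let p1 := (PySem.List.enumerate cs).foldl pvStepB1 (0, [])
  -- 'for idx, c in reversed(list(enumerate(cs)))'
  let p2 := (PySem.List.enumerate cs).reverse.foldl pvStepB2 (0, p1.2)
  String.ofList (p2.2.foldl pvFlip cs)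

-- ===== PRECONDITION & SPEC =====
def Spec_flip_ss (ss : String) (out : String) : Prop := out = flip_ss_alt ss
instance (ss : String) (out : String) : Decidable (Spec_flip_ss ss out) := by unfold Spec_flip_ss; infer_instance

-- ===== CLAIM (what is proved, stated in full; the proofs are below) =====
def Claim_equal_flip_ss : Prop := ∀ (ss : String), Dom_flip_ss ss → Spec_flip_ss ss (flip_ss ss)

-- ===== LEMMAS AND PROOFS =====

-- B's first pass tracks exactly the length of A's stack and the same unmatched-close list.
theorem pv_b1_eq_a : ∀ (l : List (Int × Char)) (s um : List Int),
    l.foldl pvStepB1 (s.length, um)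
      = ((l.foldl pvStepA (s, um)).1.length, (l.foldl pvStepA (s, um)).2) := by
  intro l
  induction l with
  | nil => intro s um; simp
  | cons ic t ih =>
    intro s um
    simp only [List.foldl_cons, pvStepA, pvStepB1]
    split_ifs with h1 h2 h3
    · simpa using ih (s ++ [ic.1]) um
    · simpa [List.length_dropLast] using ih s.dropLast um
    · exact ih s (um ++ [ic.1])
    · exact ih s um

-- the accumulator of pass 2 is only ever appended to
theorem pv_b2_acc : ∀ (l : List (Int × Char)) (k : Nat) (a : List Int),
    l.foldl pvStepB2 (k, a)
      = ((l.foldl pvStepB2 (k, [])).1, a ++ (l.foldl pvStepB2 (k, [])).2) := by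
  intro l
  induction l with
  | nil => intro k a; simp
  | cons ic t ih =>
    intro k a
    simp only [List.foldl_cons, pvStepB2]
    split_ifs with h1 h2 h3
    · exact ih (k + 1) a
    · exact ih (k - 1) a
    · simp only [List.nil_append]
      rw [ih k (a ++ [ic.1]), ih k [ic.1]]
      simp
    · exact ih k a

-- KEY: A's final stack equals (initial stack minus the unmatched closes of the right-to-left
-- pass) followed by the reversal of the unmatched opens that pass records.
theorem pv_key : ∀ (l : List (Int × Char)) (s um : List Int),
    (l.foldl pvStepA (s, um)).1
      = s.take (s.length - (l.reverse.foldl pvStepB2 (0, [])).1)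
        ++ ((l.reverse.foldl pvStepB2 (0, [])).2).reverse := by
  intro l
  induction l with
  | nil => intro s um; simp
  | cons ic t ih =>
    intro s um
    have hrev : ((ic :: t).reverse.foldl pvStepB2 (0, []) : Nat × List Int)
        = pvStepB2 (t.reverse.foldl pvStepB2 (0, [])) ic := by
      simp [List.reverse_cons, List.foldl_append]
    rw [hrev]
    set R := t.reverse.foldl pvStepB2 (0, []) with hRdef
    simp only [List.foldl_cons]
    by_cases h1 : ic.2 = '('
    · by_cases h3 : R.1 ≠ 0
      · rw [show pvStepA (s, um) ic = (s ++ [ic.1], um) by simp [pvStepA, h1]]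
        rw [show pvStepB2 R ic = (R.1 - 1, R.2) by simp [pvStepB2, h1, h3]]
        rw [ih (s ++ [ic.1]) um]
        have hk : 0 < R.1 := Nat.pos_of_ne_zero h3
        have hlen : (s ++ [ic.1]).length - R.1 = s.length - (R.1 - 1) := by
          simp [List.length_append]; omega
        rw [hlen, List.take_append_of_le_length (by omega)]
      · push_neg at h3
        rw [show pvStepA (s, um) ic = (s ++ [ic.1], um) by simp [pvStepA, h1]]
        rw [show pvStepB2 R ic = (R.1, R.2 ++ [ic.1]) by simp [pvStepB2, h1, h3]]
        rw [ih (s ++ [ic.1]) um]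
        simp only [h3, Nat.sub_zero]
        rw [List.take_of_length_le (by simp)]
        simp
    · by_cases h2 : ic.2 = ')'
      · rw [show pvStepB2 R ic = (R.1 + 1, R.2) by simp [pvStepB2, h2]]
        by_cases h3 : s.length ≠ 0
        · rw [show pvStepA (s, um) ic = (s.dropLast, um) by simp [pvStepA, h1, h2, h3]]
          rw [ih s.dropLast um]
          rw [List.dropLast_eq_take, List.length_take, List.take_take]
          congr 2
          omega
        · push_neg at h3
          rw [show pvStepA (s, um) ic = (s, um ++ [ic.1]) by simp [pvStepA, h1, h2, h3]]
          rw [ih s (um ++ [ic.1])]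
          have : s = [] := List.eq_nil_of_length_eq_zero h3
          simp [this]
      · rw [show pvStepA (s, um) ic = (s, um) by simp [pvStepA, h1, h2]]
        rw [show pvStepB2 R ic = R by simp [pvStepB2, h1, h2]]
        exact ih s um

-- every index A collects comes from the initial state or from the scanned list
theorem pv_a_mem' : ∀ (l : List (Int × Char)) (s um : List Int) (x : Int),
    (x ∈ (l.foldl pvStepA (s, um)).1 ∨ x ∈ (l.foldl pvStepA (s, um)).2)
      → x ∈ s ∨ x ∈ um ∨ x ∈ l.map Prod.fst := by
  intro l
  induction l with
  | nil => intro s um x h; simpa using h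
  | cons ic t ih =>
    intro s um x h
    simp only [List.foldl_cons, pvStepA] at h
    simp only [List.map_cons, List.mem_cons]
    split_ifs at h with h1 h2 h3
    · rcases ih (s ++ [ic.1]) um x h with hs | hu | hl
      · rcases List.mem_append.mp hs with hs | hs
        · exact Or.inl hs
        · exact Or.inr (Or.inr (Or.inl (by simpa using hs)))
      · exact Or.inr (Or.inl hu)
      · exact Or.inr (Or.inr (Or.inr hl))
    · rcases ih s.dropLast um x h with hs | hu | hl
      · exact Or.inl (List.dropLast_subset _ hs)
      · exact Or.inr (Or.inl hu)
      · exact Or.inr (Or.inr (Or.inr hl))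
    · rcases ih s (um ++ [ic.1]) x h with hs | hu | hl
      · exact Or.inl hs
      · rcases List.mem_append.mp hu with hu | hu
        · exact Or.inr (Or.inl hu)
        · exact Or.inr (Or.inr (Or.inl (by simpa using hu)))
      · exact Or.inr (Or.inr (Or.inr hl))
    · rcases ih s um x h with hs | hu | hl
      · exact Or.inl hs
      · exact Or.inr (Or.inl hu)
      · exact Or.inr (Or.inr (Or.inr hl))

-- flips at distinct nonnegative indices commute
theorem pvFlip_comm (cs : List Char) (i j : Int) (hi : 0 ≤ i) (hj : 0 ≤ j) :
    pvFlip (pvFlip cs i) j = pvFlip (pvFlip cs j) i := by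
  by_cases hij : i = j
  · rw [hij]
  · have hne : i.toNat ≠ j.toNat := by omega
    simp only [pvFlip, PySem.List.pySetD_of_nonneg _ _ hi, PySem.List.pySetD_of_nonneg _ _ hj,
      PySem.List.pyGetD_of_nonneg _ _ hi, PySem.List.pyGetD_of_nonneg _ _ hj]
    have hg : ∀ (v : Char), (cs.set i.toNat v).getD j.toNat ' ' = cs.getD j.toNat ' ' := by
      intro v; simp [List.getD, List.getElem?_set_ne hne]
    have hg' : ∀ (v : Char), (cs.set j.toNat v).getD i.toNat ' ' = cs.getD i.toNat ' ' := by
      intro v; simp [List.getD, List.getElem?_set_ne (Ne.symm hne)]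
    rw [hg, hg', List.set_comm _ _ hne]

theorem pv_main (cs : List Char) :
    (((PySem.List.enumerate cs).foldl pvStepA ([], [])).2
        ++ ((PySem.List.enumerate cs).foldl pvStepA ([], [])).1).foldl pvFlip cs
      = (((PySem.List.enumerate cs).reverse.foldl pvStepB2
            (0, ((PySem.List.enumerate cs).foldl pvStepB1 (0, [])).2)).2).foldl pvFlip cs := by
  set l := PySem.List.enumerate cs with hl
  set r := l.foldl pvStepA ([], []) with hr
  set R := l.reverse.foldl pvStepB2 (0, []) with hRdef
  have h1 : l.foldl pvStepB1 (0, []) = (r.1.length, r.2) := by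
    have := pv_b1_eq_a l [] []
    simpa [hr] using this
  have h2 : l.reverse.foldl pvStepB2 (0, r.2) = (R.1, r.2 ++ R.2) := by
    have := pv_b2_acc l.reverse 0 r.2
    simpa [hRdef] using this
  have h3 : r.1 = R.2.reverse := by
    have := pv_key l [] []
    simpa [hr, hRdef] using this
  rw [h1]
  simp only
  rw [h2]
  simp only
  have hperm : (r.2 ++ r.1).Perm (r.2 ++ R.2) := by
    apply List.Perm.append_left
    rw [h3]
    exact List.reverse_perm R.2
  have hnn : ∀ x ∈ r.2 ++ r.1, 0 ≤ x := by
    intro x hx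
    have hx' : x ∈ r.1 ∨ x ∈ r.2 := by
      rcases List.mem_append.mp hx with h | h
      · exact Or.inr h
      · exact Or.inl h
    have := pv_a_mem' l [] [] x (by simpa [hr] using hx')
    simp only [List.mem_nil_iff, false_or] at this
    rw [hl, PySem.List.map_fst_enumerate] at this
    have := PySem.List.mem_pyRange_one.mp this
    omega
  exact hperm.foldl_eq' (fun x hx y hy z => pvFlip_comm z x y (hnn x hx) (hnn y hy)) cs

theorem flip_ss_eq_alt (ss : String) : flip_ss ss = flip_ss_alt ss := by
  unfold flip_ss flip_ss_alt
  exact congrArg String.ofList (pv_main ss.toList)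

-- ===== VERDICT (by name: the statement is the Claim_ definition above) =====
theorem flip_ss_spec : Claim_equal_flip_ss := by
  intro ss _
  unfold Spec_flip_ss
  exact flip_ss_eq_alt ss
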